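-- pv_equiv track=rewrite | github.com/DavidSokoya/python | codewars/contamination.py | contamination
-- ===== SOURCE A (Python) =====
-- def contamination(text, char):
--     res = ''
--     for i in text:
--         if i == '':
--             res += ''
--         else:
--             res += char
--     return res
-- ===== SOURCE B (Python) =====
-- def contamination(text, char):
--     return char * len(text)
-- ===== Notes on version B (the rewrite author's own statement) =====
-- stated objective: simpler
-- what changed: Replaces the per-character loop (with its dead i == '' branch) by the closed form char * len(text).
import Mathlib
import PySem

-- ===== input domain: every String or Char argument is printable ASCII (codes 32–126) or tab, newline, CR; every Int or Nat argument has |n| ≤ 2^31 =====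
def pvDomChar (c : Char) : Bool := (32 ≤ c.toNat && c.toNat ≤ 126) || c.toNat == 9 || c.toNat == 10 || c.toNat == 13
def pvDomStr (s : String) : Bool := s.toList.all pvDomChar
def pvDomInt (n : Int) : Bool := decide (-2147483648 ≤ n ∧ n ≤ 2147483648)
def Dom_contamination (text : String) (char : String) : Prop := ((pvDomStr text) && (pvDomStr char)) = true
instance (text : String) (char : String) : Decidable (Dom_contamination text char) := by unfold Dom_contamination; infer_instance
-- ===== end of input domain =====

-- B replaces A's per-character loop (with its dead `i == ''` branch) by the closed form char * len(text); objective: simpler.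

-- ===== PORT A =====
-- A iterates over the characters of text, appending char each time (the `i == ''`
-- test is kept literally: a one-character string is compared with "").
def contamination (text : String) (char : String) : String :=
  text.toList.foldl (fun res i => if String.ofList [i] = "" then res ++ "" else res ++ char) ""

-- ===== PORT B =====
-- B: char * len(text)  (Python string repetition)
def contamination_alt (text : String) (char : String) : String :=
  String.join (List.replicate (PySem.Str.len text).toNat char)

-- ===== PRECONDITION & SPEC =====
def Spec_contamination (text : String) (char : String) (out : String) : Prop := out = contamination_alt text char
instance (text : String) (char : String) (out : String) : Decidable (Spec_contamination text char out) := by unfold Spec_contamination; infer_instance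

-- ===== CLAIM (what is proved, stated in full; the proofs are below) =====
def Claim_equal_contamination : Prop := ∀ (text : String) (char : String), Dom_contamination text char → Spec_contamination text char (contamination text char)

-- ===== LEMMAS AND PROOFS =====

theorem mk_single_ne_empty (i : Char) : String.ofList [i] ≠ "" := by
  intro h
  have := congrArg String.toList h
  simp at this

theorem foldl_append_shift (l : List String) (a : String) :
    List.foldl (fun r s => r ++ s) a l = a ++ List.foldl (fun r s => r ++ s) "" l := by
  induction l generalizing a with
  | nil => simp
  | cons x xs ih =>
      simp only [List.foldl_cons]
      rw [ih (a ++ x), ih ("" ++ x)]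
      simp [String.append_assoc]

theorem foldl_append_char (char : String) (l : List Char) (acc : String) :
    l.foldl (fun res i => if String.ofList [i] = "" then res ++ "" else res ++ char) acc
      = acc ++ String.join (List.replicate l.length char) := by
  induction l generalizing acc with
  | nil => simp [String.join]
  | cons x xs ih =>
      rw [List.foldl_cons, if_neg (mk_single_ne_empty x), ih]
      simp only [List.length_cons, List.replicate_succ, String.join, List.foldl_cons]
      rw [foldl_append_shift (List.replicate xs.length char) ("" ++ char)]
      simp [String.append_assoc]

theorem contamination_spec : Claim_equal_contamination := by
  intro text char _
  unfold Spec_contamination contamination contamination_alt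
  rw [foldl_append_char]
  simp [PySem.Str.len]
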